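-- pv_equiv track=rewrite | github.com/Sierraki/Solutions | 力扣&Leetcode/算法&algorithm/题库/LCP 06.拿硬币.py | minCount
-- ===== SOURCE A (Python) =====
-- from typing import List
--
-- def minCount(coins: List[int]) -> int:
--     res = 0
--     for i in coins:
--         if i % 2 == 0:
--             res += i // 2
--         else:
--             res += i // 2 + 1
--     return res
-- ===== SOURCE B (Python) =====
-- from typing import List
--
-- def minCount(coins: List[int]) -> int:
--     freq = {}
--     for c in coins:
--         freq[c] = freq.get(c, 0) + 1
--     total = 0
--     for v, k in freq.items():
--         total += -(-v // 2) * k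
--     return total
-- ===== Notes on version B (the rewrite author's own statement) =====
-- stated objective: alternative
-- what changed: B aggregates the coins into a frequency dictionary and sums ceil(v/2)*multiplicity over the DISTINCT values, computing the ceiling as negated floor division -(-v//2) instead of A's per-element parity branch and floor accumulation.
import Mathlib
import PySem

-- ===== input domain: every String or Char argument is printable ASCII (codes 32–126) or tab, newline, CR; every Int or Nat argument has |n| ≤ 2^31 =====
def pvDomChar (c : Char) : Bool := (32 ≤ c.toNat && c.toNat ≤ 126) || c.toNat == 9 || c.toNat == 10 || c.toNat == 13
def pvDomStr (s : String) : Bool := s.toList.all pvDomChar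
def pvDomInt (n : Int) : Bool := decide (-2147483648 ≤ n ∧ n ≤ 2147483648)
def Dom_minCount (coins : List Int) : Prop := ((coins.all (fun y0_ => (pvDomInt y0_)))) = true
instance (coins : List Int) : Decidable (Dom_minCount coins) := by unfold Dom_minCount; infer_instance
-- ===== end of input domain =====

-- B aggregates the coins into a frequency dictionary and sums ceil(v/2)*multiplicity over the
-- distinct values (ceiling via negated floor division); alternative algorithm, same value proved equal.

-- ===== PORT A =====
def minCount (coins : List Int) : Int :=
  coins.foldl (fun res i =>
    if PySem.Int.mod i 2 = 0 then res + PySem.Int.floordiv i 2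
    else res + (PySem.Int.floordiv i 2 + 1)) 0

-- ===== PORT B =====
def minCount_alt (coins : List Int) : Int :=
  let freq := coins.foldl (fun d c => d.insert c (d.getD c 0 + 1)) PySem.Dict.empty
  freq.items.foldl (fun total p => total + (-(PySem.Int.floordiv (-p.1) 2)) * p.2) 0

-- ===== PRECONDITION & SPEC =====
def Spec_minCount (coins : List Int) (out : Int) : Prop := out = minCount_alt coins
instance (coins : List Int) (out : Int) : Decidable (Spec_minCount coins out) := by unfold Spec_minCount; infer_instance

-- ===== CLAIM (what is proved, stated in full; the proofs are below) =====
def Claim_equal_minCount : Prop := ∀ (coins : List Int), Dom_minCount coins → Spec_minCount coins (minCount coins)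

-- ===== LEMMAS AND PROOFS =====

-- ===== VERDICT (by name: the statement is the Claim_ definition above) =====
-- the per-coin value A adds equals ceil(c/2) written as negated floor division
lemma weight_eq (c : Int) :
    (if PySem.Int.mod c 2 = 0 then PySem.Int.floordiv c 2
     else PySem.Int.floordiv c 2 + 1) = -(PySem.Int.floordiv (-c) 2) := by
  have h2 : (0:Int) < 2 := by decide
  rw [PySem.Int.mod_eq_emod_of_pos h2, PySem.Int.floordiv_eq_ediv_of_pos h2,
      PySem.Int.floordiv_eq_ediv_of_pos h2]
  omega

-- A's fold is the plain sum of the per-coin weights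
lemma minCount_eq_sum (coins : List Int) :
    minCount coins = (coins.map (fun c => -(PySem.Int.floordiv (-c) 2))).sum := by
  unfold minCount
  have : ∀ (l : List Int) (r : Int),
      l.foldl (fun res i =>
        if PySem.Int.mod i 2 = 0 then res + PySem.Int.floordiv i 2
        else res + (PySem.Int.floordiv i 2 + 1)) r
      = r + (l.map (fun c => -(PySem.Int.floordiv (-c) 2))).sum := by
    intro l
    induction l with
    | nil => simp
    | cons c cs ih =>
      intro r
      simp only [List.foldl_cons, List.map_cons, List.sum_cons, ih]
      by_cases h : PySem.Int.mod c 2 = 0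
      · rw [if_pos h]; have := weight_eq c; rw [if_pos h] at this; rw [this]; ring
      · rw [if_neg h]; have := weight_eq c; rw [if_neg h] at this; rw [this]; ring
  rw [this]; ring

-- summing (if k = x then f k else 0) over a Nodup list containing x gives f x
lemma sum_single (f : Int → Int) (x : Int) (ks : List Int) (hnd : ks.Nodup) (hx : x ∈ ks) :
    (ks.map (fun k => if k = x then f k else 0)).sum = f x := by
  induction ks with
  | nil => simp at hx
  | cons k ks ihk =>
    simp only [List.map_cons, List.sum_cons]
    rcases List.mem_cons.mp hx with h | h
    · subst h
      rw [if_pos rfl]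
      have hz : (ks.map (fun j => if j = x then f j else 0)).sum = 0 := by
        rw [List.sum_eq_zero]
        intro y hy
        obtain ⟨j, hj, rfl⟩ := List.mem_map.mp hy
        rw [if_neg (fun (e : j = x) => (List.nodup_cons.mp hnd).1 (e ▸ hj))]
      rw [hz]; ring
    · have hkx : ¬ (k = x) := fun e => (List.nodup_cons.mp hnd).1 (e ▸ h)
      rw [if_neg hkx, ihk (List.nodup_cons.mp hnd).2 h]; ring

-- summing f k * count k over any Nodup list containing all elements of xs gives the plain sum
lemma sum_count_eq (f : Int → Int) (xs ks : List Int) (hnd : ks.Nodup)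
    (hsub : ∀ x ∈ xs, x ∈ ks) :
    (ks.map (fun k => f k * (xs.count k : Int))).sum = (xs.map f).sum := by
  induction xs with
  | nil => simp
  | cons x xs ih =>
    have hx : x ∈ ks := hsub x (List.mem_cons_self ..)
    have hsub' : ∀ y ∈ xs, y ∈ ks := fun y hy => hsub y (List.mem_cons_of_mem _ hy)
    have split : (ks.map (fun k => f k * ((x :: xs).count k : Int))).sum
        = (ks.map (fun k => f k * (xs.count k : Int))).sum
          + (ks.map (fun k => if k = x then f k else 0)).sum := by
      rw [← PySem.List.sum_map_add_int]
      apply congrArg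
      apply List.map_congr_left
      intro k _
      by_cases hk : k = x
      · subst hk; rw [List.count_cons_self, if_pos rfl]; push_cast; ring
      · rw [List.count_cons_of_ne (fun e => hk e.symm), if_neg hk]; ring
    rw [List.map_cons, List.sum_cons, split, ih hsub', sum_single f x ks hnd hx]; ring

theorem minCount_spec : Claim_equal_minCount := by
  intro coins _
  unfold Spec_minCount minCount_alt
  rw [minCount_eq_sum]
  simp only [PySem.Dict.foldl_insert_getD_add_one_eq_counter, PySem.Dict.items_counter]
  rw [PySem.List.foldl_add, List.map_map]
  have := sum_count_eq (fun v => -(PySem.Int.floordiv (-v) 2)) coins (PySem.Set.ofList coins)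
    (PySem.Set.nodup_ofList coins) (fun x hx => (PySem.Set.mem_ofList ..).mpr hx)
  simpa using this.symm
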